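-- pv_equiv track=rewrite | github.com/MonsterBlue01/UCSC-Virtual-Assistant | bot.py | format_scraped_content
-- ===== SOURCE A (Python) =====
-- def format_scraped_content(content, total_max_length=3000):
--     formatted_content = []
--     current_length = 0
--
--     for item in content:
--         text_snippet = item['text'][:500] + '...' if len(item['text']) > 500 else item['text']
--         formatted_item = f"Title: {item['title']}\nURL: {item['url']}\nText: {text_snippet}"
--
--         if current_length + len(formatted_item) > total_max_length:
--             break  # Stop adding more items if the total limit is exceeded
--
--         formatted_content.append(formatted_item)
--         current_length += len(formatted_item)
--
--     return '\n\n'.join(formatted_content) if formatted_content else "Scraping failed."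
-- ===== SOURCE B (Python) =====
-- def format_scraped_content(content, total_max_length=3000):
--     formatted = [
--         "Title: {}\nURL: {}\nText: {}".format(
--             item['title'],
--             item['url'],
--             item['text'][:500] + '...' if len(item['text']) > 500 else item['text'],
--         )
--         for item in content
--     ]
--     totals = []
--     t = 0
--     for s in formatted:
--         t += len(s)
--         totals.append(t)
--     cut = len(totals)
--     for i, t in enumerate(totals):
--         if t > total_max_length:
--             cut = i
--             break
--     kept = formatted[:cut]
--     return '\n\n'.join(kept) if kept else "Scraping failed."
-- ===== Notes on version B (the rewrite author's own statement) =====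
-- stated objective: alternative
-- what changed: Replaces A's single break-on-overflow accumulator loop by a build-table-then-locate-cutoff decomposition: format every item first, compute inclusive prefix sums of lengths, find the first index whose prefix sum exceeds the limit, and join the slice before it.
import Mathlib
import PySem

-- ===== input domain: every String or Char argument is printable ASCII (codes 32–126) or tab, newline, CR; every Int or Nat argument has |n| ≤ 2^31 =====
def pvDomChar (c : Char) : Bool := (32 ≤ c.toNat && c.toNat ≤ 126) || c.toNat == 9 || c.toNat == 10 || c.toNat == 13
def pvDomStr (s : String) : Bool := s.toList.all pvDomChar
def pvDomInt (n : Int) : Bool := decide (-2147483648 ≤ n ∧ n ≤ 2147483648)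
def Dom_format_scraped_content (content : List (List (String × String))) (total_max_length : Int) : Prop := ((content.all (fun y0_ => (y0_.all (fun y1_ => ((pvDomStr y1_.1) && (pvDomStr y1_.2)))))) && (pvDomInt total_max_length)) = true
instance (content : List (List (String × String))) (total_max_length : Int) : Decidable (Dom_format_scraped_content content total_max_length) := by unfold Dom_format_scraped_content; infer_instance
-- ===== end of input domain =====

-- B builds the full table of formatted items, locates the cutoff via inclusive prefix sums
-- of their lengths and joins the slice before it, instead of A's break-on-overflow accumulator loop.

-- ===== PORT A =====
-- A-side helper: formatted_item for one dict (keys guaranteed by Pre_; getD "" is unreachable inside Pre_)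
def pvFmtA (item : List (String × String)) : String :=
  let text := (item.lookup "text").getD ""
  let text_snippet :=
    if PySem.Str.len text > 500 then PySem.Str.slice text none (some 500) ++ "..." else text
  "Title: " ++ (item.lookup "title").getD "" ++ "\nURL: " ++
    (item.lookup "url").getD "" ++ "\nText: " ++ text_snippet

-- A's for-loop with its two accumulators (formatted_content, current_length) and the break
def pvLoopA (total_max_length : Int) :
    List (List (String × String)) → List String → Int → List String
  | [], acc, _ => acc
  | item :: rest, acc, cur =>
    let fi := pvFmtA item
    if cur + PySem.Str.len fi > total_max_length then acc
    else pvLoopA total_max_length rest (acc ++ [fi]) (cur + PySem.Str.len fi)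

def format_scraped_content (content : List (List (String × String))) (total_max_length : Int) : String :=
  let formatted_content := pvLoopA total_max_length content [] 0
  if formatted_content ≠ [] then PySem.Str.join "\n\n" formatted_content else "Scraping failed."

-- ===== PORT B =====
-- B-side helper: the per-item format expression of Source B's comprehension
def pvFmtB (item : List (String × String)) : String :=
  "Title: " ++ (item.lookup "title").getD "" ++ "\nURL: " ++
    (item.lookup "url").getD "" ++ "\nText: " ++
    (let text := (item.lookup "text").getD ""
     if PySem.Str.len text > 500 then PySem.Str.slice text none (some 500) ++ "..." else text)

-- inclusive prefix sums of the lengths (Source B's 'totals' loop, running total t)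
def pvTotals (t : Int) : List String → List Int
  | [] => []
  | s :: rest => (t + PySem.Str.len s) :: pvTotals (t + PySem.Str.len s) rest

-- first index whose inclusive total exceeds the limit (Source B's cut-locating scan with break)
def pvCut (total_max_length : Int) : List Int → Nat
  | [] => 0
  | t :: rest => if t > total_max_length then 0 else 1 + pvCut total_max_length rest

def format_scraped_content_alt (content : List (List (String × String))) (total_max_length : Int) : String :=
  let formatted := content.map pvFmtB
  let totals := pvTotals 0 formatted
  let kept := formatted.take (pvCut total_max_length totals)
  if kept ≠ [] then PySem.Str.join "\n\n" kept else "Scraping failed."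

-- ===== PRECONDITION & SPEC =====
-- Pre_ excludes only the inputs where the Python A raises KeyError: an item missing one of the
-- keys 'text'/'title'/'url' (B raises there too).
def Pre_format_scraped_content (content : List (List (String × String))) (total_max_length : Int) : Prop :=
  ∀ item ∈ content, (item.lookup "text").isSome ∧
    (item.lookup "title").isSome ∧ (item.lookup "url").isSome
instance (content : List (List (String × String))) (total_max_length : Int) : Decidable (Pre_format_scraped_content content total_max_length) := by unfold Pre_format_scraped_content; infer_instance
def pvWitness_format_scraped_content : (List (List (String × String))) × Int :=
  ([[("text", "hello"), ("title", "T"), ("url", "u")]], 3000)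

def Spec_format_scraped_content (content : List (List (String × String))) (total_max_length : Int) (out : String) : Prop := out = format_scraped_content_alt content total_max_length
instance (content : List (List (String × String))) (total_max_length : Int) (out : String) : Decidable (Spec_format_scraped_content content total_max_length out) := by unfold Spec_format_scraped_content; infer_instance

-- ===== CLAIM =====
def Claim_equal_format_scraped_content : Prop := ∀ (content : List (List (String × String))) (total_max_length : Int), Dom_format_scraped_content content total_max_length → Pre_format_scraped_content content total_max_length → Spec_format_scraped_content content total_max_length (format_scraped_content content total_max_length)

-- ===== LEMMAS AND PROOFS =====
theorem pvFmtB_eq_fmtA (item : List (String × String)) : pvFmtB item = pvFmtA item := by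
  simp [pvFmtA, pvFmtB]

theorem pvLoopA_eq_take (total_max_length : Int) (items : List (List (String × String)))
    (acc : List String) (cur : Int) :
    pvLoopA total_max_length items acc cur =
      acc ++ (items.map pvFmtA).take (pvCut total_max_length (pvTotals cur (items.map pvFmtA))) := by
  induction items generalizing acc cur with
  | nil => simp [pvLoopA, pvTotals, pvCut]
  | cons item rest ih =>
    simp only [pvLoopA, List.map_cons, pvTotals, pvCut]
    split
    · simp
    · rw [ih]
      rw [Nat.add_comm, List.take_succ_cons]; simp

theorem format_scraped_content_spec' (content : List (List (String × String)))
    (total_max_length : Int) :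
    format_scraped_content content total_max_length =
      format_scraped_content_alt content total_max_length := by
  unfold format_scraped_content format_scraped_content_alt
  have hmap : content.map pvFmtB = content.map pvFmtA :=
    List.map_congr_left (fun x _ => pvFmtB_eq_fmtA x)
  rw [hmap, pvLoopA_eq_take]
  simp

-- ===== VERDICT =====
theorem format_scraped_content_spec : Claim_equal_format_scraped_content := by
  intro content total_max_length _ _
  exact format_scraped_content_spec' content total_max_length
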